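-- pv_equiv track=rewrite | github.com/1hew/ComfyUI-1hewNodes | nodes/image/image_batch_interleave.py | _build_interleave_indices
-- ===== SOURCE A (Python) =====
-- def _build_interleave_indices(batch_size: int, segment_count: int) -> list[int]:
--     base_size = batch_size // segment_count
--     remainder = batch_size % segment_count
--
--     segments: list[list[int]] = []
--     start = 0
--     for segment_idx in range(segment_count):
--         current_size = base_size + (1 if segment_idx < remainder else 0)
--         end = start + current_size
--         segments.append(list(range(start, end)))
--         start = end
--
--     indices: list[int] = []
--     max_segment_length = max((len(seg) for seg in segments), default=0)
--     for offset in range(max_segment_length):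
--         for seg in segments:
--             if offset < len(seg):
--                 indices.append(seg[offset])
--     return indices
-- ===== SOURCE B (Python) =====
-- def _build_interleave_indices(batch_size: int, segment_count: int) -> list[int]:
--     if segment_count <= 0 or batch_size <= 0:
--         return []
--     base, rem = divmod(batch_size, segment_count)
--     height = base + (1 if rem else 0)
--     return [j * base + min(j, rem) + o
--             for o in range(height)
--             for j in range(segment_count)
--             if o < base + (1 if j < rem else 0)]
-- ===== Notes on version B (the rewrite author's own statement) =====
-- stated objective: simpler
-- what changed: Replaces A's two-phase 'build per-segment index lists, then transpose with an offset-outer/segment-inner scan' by a closed-form start formula (start_j = j*base + min(j, rem)) emitted in a single flat comprehension with no intermediate lists, after an early return of [] on degenerate (non-positive) arguments.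
import Mathlib
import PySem

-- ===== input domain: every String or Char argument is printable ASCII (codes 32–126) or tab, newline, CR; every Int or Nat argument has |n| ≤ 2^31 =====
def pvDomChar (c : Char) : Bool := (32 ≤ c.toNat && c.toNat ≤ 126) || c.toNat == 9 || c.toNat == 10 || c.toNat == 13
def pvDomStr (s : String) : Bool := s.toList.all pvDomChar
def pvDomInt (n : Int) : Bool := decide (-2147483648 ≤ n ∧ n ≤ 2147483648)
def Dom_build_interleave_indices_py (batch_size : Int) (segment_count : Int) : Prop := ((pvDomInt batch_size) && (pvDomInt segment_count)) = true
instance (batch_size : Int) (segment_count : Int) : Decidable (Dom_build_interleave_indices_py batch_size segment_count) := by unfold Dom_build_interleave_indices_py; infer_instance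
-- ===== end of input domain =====

-- B replaces A's "build per-segment index lists, then transpose with an offset-outer scan" by a
-- closed-form start formula (start_j = j*base + min(j, rem)) emitted in one flat comprehension; objective: simpler.


-- ===== PORT A =====
def build_interleave_indices_py (batch_size : Int) (segment_count : Int) : List Int :=
  let base_size := PySem.Int.floordiv batch_size segment_count
  let remainder := PySem.Int.mod batch_size segment_count
  -- loop building `segments` with running `start` (pair state: (segments, start))
  let fin := (PySem.List.pyRange 0 segment_count 1).foldl
      (fun (p : List (List Int) × Int) segment_idx =>
        (p.1 ++ [PySem.List.pyRange p.2 (p.2 + (base_size + (if segment_idx < remainder then (1:Int) else 0))) 1],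
         p.2 + (base_size + (if segment_idx < remainder then (1:Int) else 0))))
      ([], 0)
  let segments := fin.1
  -- max((len(seg) for seg in segments), default=0)
  let max_segment_length : Int :=
    match PySem.List.max? (segments.map (fun seg => (seg.length : Int))) (fun x => x) with
    | some m => m
    | none => 0
  -- offset-outer / segment-inner append loop; seg[offset] is guarded by offset < len(seg), so pyGetD's default is never used
  (PySem.List.pyRange 0 max_segment_length 1).foldl
    (fun indices offset =>
      segments.foldl
        (fun indices seg =>
          if offset < (seg.length : Int) then indices ++ [PySem.List.pyGetD seg offset 0]
          else indices)
        indices)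
    []

-- ===== PORT B =====
def build_interleave_indices_py_alt (batch_size : Int) (segment_count : Int) : List Int :=
  if segment_count ≤ 0 ∨ batch_size ≤ 0 then []
  else
  let base := PySem.Int.floordiv batch_size segment_count
  let rem := PySem.Int.mod batch_size segment_count
  let height := base + (if rem ≠ 0 then (1:Int) else 0)
  -- [j*base + min(j, rem) + o for o in range(height) for j in range(segment_count) if o < base + (1 if j < rem else 0)]
  (PySem.List.pyRange 0 height 1).flatMap (fun o =>
    ((PySem.List.pyRange 0 segment_count 1).filter
        (fun j => decide (o < base + (if j < rem then (1:Int) else 0)))).map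
      (fun j => j * base + min j rem + o))

-- ===== PRECONDITION & SPEC =====
-- Pre_ excludes exactly segment_count = 0, where Python A raises ZeroDivisionError (batch_size // 0).
def Pre_build_interleave_indices_py (batch_size : Int) (segment_count : Int) : Prop := segment_count ≠ 0
instance (batch_size : Int) (segment_count : Int) : Decidable (Pre_build_interleave_indices_py batch_size segment_count) := by unfold Pre_build_interleave_indices_py; infer_instance
def pvWitness_build_interleave_indices_py : Int × Int := (7, 3)

def Spec_build_interleave_indices_py (batch_size : Int) (segment_count : Int) (out : List Int) : Prop := out = build_interleave_indices_py_alt batch_size segment_count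
instance (batch_size : Int) (segment_count : Int) (out : List Int) : Decidable (Spec_build_interleave_indices_py batch_size segment_count out) := by unfold Spec_build_interleave_indices_py; infer_instance

-- ===== CLAIM (what is proved, stated in full; the proofs are below) =====
def Claim_equal_build_interleave_indices_py : Prop := ∀ (batch_size : Int) (segment_count : Int), Dom_build_interleave_indices_py batch_size segment_count → Pre_build_interleave_indices_py batch_size segment_count → Spec_build_interleave_indices_py batch_size segment_count (build_interleave_indices_py batch_size segment_count)

-- ===== LEMMAS AND PROOFS =====

-- closed forms for A's segment loop: size, start and the j-th segment
def pvSz (b r j : Int) : Int := b + (if j < r then 1 else 0)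
def pvSt (b r j : Int) : Int := j * b + min j r
def pvSeg (b r j : Int) : List Int := PySem.List.pyRange (pvSt b r j) (pvSt b r j + pvSz b r j) 1

lemma pvSt_succ (b r j : Int) : pvSt b r j + pvSz b r j = pvSt b r (j + 1) := by
  unfold pvSt pvSz; split_ifs <;> ring_nf <;> omega

-- A's segment-building fold, characterized
lemma seg_fold (b r s : Int) : ∀ (k : Nat) (a : Int) (acc : List (List Int)), (s - a).toNat = k →
    (PySem.List.pyRange a s 1).foldl
      (fun (p : List (List Int) × Int) j =>
        (p.1 ++ [PySem.List.pyRange p.2 (p.2 + (b + (if j < r then (1:Int) else 0))) 1],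
         p.2 + (b + (if j < r then (1:Int) else 0))))
      (acc, pvSt b r a)
    = (acc ++ (PySem.List.pyRange a s 1).map (pvSeg b r), pvSt b r (max a s)) := by
  intro k
  induction k with
  | zero =>
    intro a acc h
    have hs : s ≤ a := by omega
    have hm : max a s = a := by omega
    simp [PySem.List.pyRange_one_eq_nil hs, hm]
  | succ k ih =>
    intro a acc h
    have ha : a < s := by omega
    rw [PySem.List.pyRange_one_cons ha, List.foldl_cons, List.map_cons]
    simp only []
    have e1 : pvSt b r a + (b + (if a < r then (1:Int) else 0)) = pvSt b r (a+1) := by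
      simpa [pvSz] using pvSt_succ b r a
    have e2 : PySem.List.pyRange (pvSt b r a) (pvSt b r (a+1)) 1 = pvSeg b r a := by
      rw [← pvSt_succ b r a]
      unfold pvSeg
      rfl
    rw [e1, e2, ih (a+1) (acc ++ [pvSeg b r a]) (by omega)]
    have hm : max (a+1) s = max a s := by omega
    simp [hm]

lemma length_pvSeg (b r j : Int) : ((pvSeg b r j).length : Int) = max (pvSz b r j) 0 := by
  unfold pvSeg
  rw [PySem.List.length_pyRange_one]
  omega

lemma pvSeg_get (b r j o : Int) (ho : 0 ≤ o) (hlt : o < pvSz b r j) :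
    PySem.List.pyGetD (pvSeg b r j) o 0 = pvSt b r j + o := by
  unfold pvSeg
  rw [PySem.List.pyGetD_of_nonneg _ _ ho]
  have hk : o.toNat < (PySem.List.pyRange (pvSt b r j) (pvSt b r j + pvSz b r j) 1).length := by
    rw [PySem.List.length_pyRange_one]; omega
  rw [List.getD_eq_getElem _ _ hk, PySem.List.getElem_pyRange_one]
  omega

theorem build_interleave_indices_py_spec : Claim_equal_build_interleave_indices_py := by
  intro n s _ hs
  unfold Spec_build_interleave_indices_py
  simp only [build_interleave_indices_py, build_interleave_indices_py_alt]
  set b := PySem.Int.floordiv n s with hb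
  set r := PySem.Int.mod n s with hr
  rcases lt_trichotomy s 0 with hneg | h0 | hpos
  · -- s < 0: both sides are []
    rw [if_pos (Or.inl hneg.le)]
    rw [PySem.List.pyRange_one_eq_nil hneg.le]
    simp [PySem.List.pyRange_one_eq_nil (le_refl (0:Int)), PySem.List.max?]
  · exact absurd h0 hs
  · -- s > 0
    have hr0 : 0 ≤ r := PySem.Int.mod_nonneg n hpos
    have hst0 : pvSt b r 0 = 0 := by unfold pvSt; omega
    have hsegs := seg_fold b r s (s - 0).toNat 0 [] rfl
    rw [hst0] at hsegs
    rw [hsegs]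
    simp only [List.nil_append, List.map_map, Function.comp_def]
    set H := b + (if r ≠ 0 then (1:Int) else 0) with hH
    have hszH : ∀ j : Int, 0 ≤ j → pvSz b r j ≤ H ∧ pvSz b r 0 = H := by
      intro j hj
      unfold pvSz
      rw [hH]
      constructor <;> split_ifs <;> omega
    have hmax : PySem.List.max? ((PySem.List.pyRange 0 s 1).map
        (fun j => ((pvSeg b r j).length : Int))) (fun x => x) = some (max H 0) := by
      cases hm : PySem.List.max? ((PySem.List.pyRange 0 s 1).map
          (fun j => ((pvSeg b r j).length : Int))) (fun x => x) with
      | none =>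
        rw [PySem.List.max?_eq_none_iff] at hm
        have : (0:Int) ∈ PySem.List.pyRange 0 s 1 := PySem.List.mem_pyRange_one.mpr ⟨le_refl 0, hpos⟩
        simp only [List.map_eq_nil_iff] at hm
        rw [hm] at this
        simp at this
      | some m =>
        have hmem := PySem.List.max?_mem hm
        obtain ⟨j, hjmem, hjm⟩ := List.mem_map.mp hmem
        have hjr := PySem.List.mem_pyRange_one.mp hjmem
        have hub := PySem.List.max?_isMax hm
        have h0mem : ((pvSeg b r 0).length : Int) ∈ (PySem.List.pyRange 0 s 1).map
            (fun j => ((pvSeg b r j).length : Int)) :=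
          List.mem_map.mpr ⟨0, PySem.List.mem_pyRange_one.mpr ⟨le_refl 0, hpos⟩, rfl⟩
        have hle := hub _ h0mem
        have e0 : ((pvSeg b r 0).length : Int) = max (pvSz b r 0) 0 := length_pvSeg b r 0
        have ej : ((pvSeg b r j).length : Int) = max (pvSz b r j) 0 := length_pvSeg b r j
        have hj0 := (hszH j hjr.1).1
        have h00 := (hszH 0 (le_refl 0)).2
        have : m = max H 0 := by omega
        rw [this]
    rw [hmax]
    simp only []
    have hbs := PySem.Int.floordiv_mul_add_mod n s
    rw [← hb, ← hr] at hbs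
    by_cases hn : n ≤ 0
    · -- batch_size ≤ 0: B's guard returns []; A's max segment length is 0
      rw [if_pos (Or.inr hn)]
      have hH0 : H ≤ 0 := by
        by_contra hc'
        have hc : 0 < H := by omega
        by_cases hrz : r = 0
        · have hH' : H = b := by rw [hH, if_neg (by simp [hrz])]; ring
          rw [hH'] at hc
          have h1 : b ≤ b * s := le_mul_of_one_le_right hc.le (by omega)
          linarith
        · have hH' : H = b + 1 := by rw [hH, if_pos hrz]
          have hb0 : 0 ≤ b := by rw [hH'] at hc; omega
          have hrpos : 0 < r := lt_of_le_of_ne hr0 (Ne.symm hrz)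
          have h1 : 0 ≤ b * s := mul_nonneg hb0 hpos.le
          linarith
      have hm0 : max H 0 = 0 := by omega
      rw [hm0, PySem.List.pyRange_one_eq_nil (le_refl (0:Int))]
      rfl
    · rw [if_neg (by omega)]
      by_cases hHp : 0 ≤ H
      · have : max H 0 = H := by omega
        rw [this]
        simp only [PySem.List.foldl_append_ite, PySem.List.foldl_append_eq_flatMap, List.nil_append]
        apply List.flatMap_congr
        intro o ho
        obtain ⟨ho0, hoH⟩ := PySem.List.mem_pyRange_one.mp ho
        rw [List.filter_map, List.map_map]
        have hfilt : (PySem.List.pyRange 0 s 1).filter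
              ((fun seg => decide (o < (seg.length : Int))) ∘ pvSeg b r)
            = (PySem.List.pyRange 0 s 1).filter
              (fun j => decide (o < b + (if j < r then (1:Int) else 0))) := by
          apply List.filter_congr
          intro j hj
          have hjr := PySem.List.mem_pyRange_one.mp hj
          simp only [Function.comp_apply]
          apply decide_eq_decide.mpr
          rw [length_pvSeg]
          unfold pvSz
          split_ifs <;> omega
        rw [hfilt]
        apply List.map_congr_left
        intro j hj
        obtain ⟨hjmem, hjcond⟩ := List.mem_filter.mp hj
        have hcond : o < pvSz b r j := by
          have := of_decide_eq_true hjcond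
          unfold pvSz
          exact this
        simp only [Function.comp_apply]
        rw [pvSeg_get b r j o ho0 hcond]
        unfold pvSt
        ring
      · have hHn : H ≤ 0 := by omega
        have hm0 : max H 0 = 0 := by omega
        rw [hm0, PySem.List.pyRange_one_eq_nil (le_refl (0:Int)), PySem.List.pyRange_one_eq_nil hHn]
        simp
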